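-- pv_equiv track=rewrite | github.com/amir-khoshdel-louyeh/auto-system-agent | src/auto_system_agent/safe_executor.py | _is_transient_install_failure
-- ===== SOURCE A (Python) =====
-- def _is_transient_install_failure(output_text: str) -> bool:
--     lowered = output_text.lower()
--     transient_markers = {
--         "temporary failure",
--         "timed out",
--         "timeout",
--         "try again",
--         "connection reset",
--         "connection refused",
--         "network is unreachable",
--         "could not resolve",
--         "failed to fetch",
--     }
--     return any(marker in lowered for marker in transient_markers)
-- ===== SOURCE B (Python) =====
-- def _is_transient_install_failure(output_text: str) -> bool:
--     # Single left-to-right scan: at each position, test whether any marker starts there.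
--     markers = [
--         "temporary failure",
--         "timed out",
--         "timeout",
--         "try again",
--         "connection reset",
--         "connection refused",
--         "network is unreachable",
--         "could not resolve",
--         "failed to fetch",
--     ]
--     t = output_text.lower()
--     for i in range(len(t)):
--         for m in markers:
--             if t.startswith(m, i):
--                 return True
--     return False
-- ===== Notes on version B (the rewrite author's own statement) =====
-- stated objective: alternative
-- what changed: Replaces the per-marker substring scan (one 'in' search over the whole text for each marker) with a single left-to-right position scan that at each index tests whether any marker starts there.
import Mathlib
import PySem

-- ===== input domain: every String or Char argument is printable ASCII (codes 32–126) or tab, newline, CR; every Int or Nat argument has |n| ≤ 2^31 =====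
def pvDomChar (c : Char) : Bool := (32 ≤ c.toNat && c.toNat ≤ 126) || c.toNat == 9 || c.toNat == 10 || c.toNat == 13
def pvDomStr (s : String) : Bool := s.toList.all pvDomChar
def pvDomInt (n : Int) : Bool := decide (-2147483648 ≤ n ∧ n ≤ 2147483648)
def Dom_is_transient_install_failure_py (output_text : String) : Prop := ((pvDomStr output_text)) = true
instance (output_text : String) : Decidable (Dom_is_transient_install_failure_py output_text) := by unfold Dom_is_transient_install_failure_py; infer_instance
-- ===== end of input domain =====

-- B replaces A's per-marker whole-text substring scans with a single left-to-right
-- position scan testing each position for a marker start (alternative decomposition).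


-- ===== PORT A =====
-- The marker set of both Pythons (a set of string literals; only membership of each
-- marker as a substring matters, so it is ported as the list of its elements).
def pvMarkers : List (List Char) :=
  ["temporary failure".toList, "timed out".toList, "timeout".toList, "try again".toList,
   "connection reset".toList, "connection refused".toList, "network is unreachable".toList,
   "could not resolve".toList, "failed to fetch".toList]

def is_transient_install_failure_py (output_text : String) : Bool :=
  let lowered := (PySem.Str.lower output_text).toList
  pvMarkers.any (fun marker => PySem.Chars.isIn marker lowered)

-- ===== PORT B =====
def is_transient_install_failure_py_alt (output_text : String) : Bool :=
  let t := (PySem.Str.lower output_text).toList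
  (List.range t.length).any (fun i =>
    pvMarkers.any (fun m => PySem.Chars.startswith (t.drop i) m))

-- ===== PRECONDITION & SPEC =====
def Spec_is_transient_install_failure_py (output_text : String) (out : Bool) : Prop := out = is_transient_install_failure_py_alt output_text
instance (output_text : String) (out : Bool) : Decidable (Spec_is_transient_install_failure_py output_text out) := by unfold Spec_is_transient_install_failure_py; infer_instance

-- ===== CLAIM (what is proved, stated in full; the proofs are below) =====
def Claim_equal_is_transient_install_failure_py : Prop := ∀ (output_text : String), Dom_is_transient_install_failure_py output_text → Spec_is_transient_install_failure_py output_text (is_transient_install_failure_py output_text)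

-- ===== LEMMAS AND PROOFS =====

-- Every marker is nonempty.
theorem pvMarkers_ne_nil : ∀ m ∈ pvMarkers, m ≠ [] := by decide

-- A nonempty pattern occurs as a substring iff it starts at some in-range position.
theorem isIn_iff_starts_at (m L : List Char) (hm : m ≠ []) :
    PySem.Chars.isIn m L = true ↔ ∃ i < L.length, PySem.Chars.startswith (L.drop i) m = true := by
  rw [← PySem.Chars.exists_prefix_drop_iff_isIn]
  constructor
  · rintro ⟨j, hj⟩
    refine ⟨j, ?_, ?_⟩
    · rcases Nat.lt_or_ge j L.length with h | h
      · exact h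
      · rw [List.drop_eq_nil_of_le h] at hj
        exact absurd (List.prefix_nil.mp hj) hm
    · exact (PySem.Chars.startswith_iff _ _).mpr hj
  · rintro ⟨i, _, hi⟩
    exact ⟨i, (PySem.Chars.startswith_iff _ _).mp hi⟩

-- ===== VERDICT (by name: the statement is the Claim_ definition above) =====
theorem is_transient_install_failure_py_spec : Claim_equal_is_transient_install_failure_py := by
  intro s _
  unfold Spec_is_transient_install_failure_py
  unfold is_transient_install_failure_py is_transient_install_failure_py_alt
  rw [Bool.eq_iff_iff]
  simp only [List.any_eq_true, List.mem_range]
  constructor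
  · rintro ⟨m, hm, hin⟩
    obtain ⟨i, hi, hs⟩ := (isIn_iff_starts_at m _ (pvMarkers_ne_nil m hm)).mp hin
    exact ⟨i, hi, m, hm, hs⟩
  · rintro ⟨i, hi, m, hm, hs⟩
    exact ⟨m, hm, (isIn_iff_starts_at m _ (pvMarkers_ne_nil m hm)).mpr ⟨i, hi, hs⟩⟩
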